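-- pv_equiv track=rewrite | github.com/mglanzma/AdventOfCode2024 | Day4/silverStar/wordSearcher.py | findXmasVertical
-- ===== SOURCE A (Python) =====
-- def findXmasVertical(wordSearch):
--     # running total for number of XMAS found
--     numFound = 0
--
--     # index values for reading correct column from each row
--     curr = 0
--     maxIndex = len(wordSearch[1])
--
--     # temp list to store all letters collected
--     tempList = []
--
--     # adds all columns to a tempString then counts
--     while(curr < maxIndex):
--         for line in wordSearch:
--             tempList.append(line[curr])
--
--         # turn all collected values into string
--         columnStr = ''.join(tempList)
--         # count number of valid words in string
--         numFound += columnStr.count("XMAS")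
--         numFound += columnStr.count("SAMX")
--
--         # clear tempList and iterate loop
--         tempList.clear()
--         curr += 1
--
--     # return total number of vertical words in word search
--     return numFound
-- ===== SOURCE B (Python) =====
-- def findXmasVertical(wordSearch):
--     # single pass down each column with a rolling window of the last three
--     # characters, instead of building a column string and scanning it twice
--     # with str.count
--     total = 0
--     for c in range(len(wordSearch[1])):
--         p1 = p2 = p3 = None
--         for row in wordSearch:
--             ch = row[c]
--             if p1 is not None and p1 + p2 + p3 + ch in ("XMAS", "SAMX"):
--                 total += 1
--             p1, p2, p3 = p2, p3, ch
--     return total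
-- ===== Notes on version B (the rewrite author's own statement) =====
-- stated objective: alternative
-- what changed: Instead of joining each column into a string and running two non-overlapping str.count scans (one per target word), B makes a single pass down each column with a rolling window of the last three characters and counts windows spelling either word; Pre_ excludes exactly the inputs where A raises IndexError (fewer than 2 rows, or a row shorter than row 1).
import Mathlib
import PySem

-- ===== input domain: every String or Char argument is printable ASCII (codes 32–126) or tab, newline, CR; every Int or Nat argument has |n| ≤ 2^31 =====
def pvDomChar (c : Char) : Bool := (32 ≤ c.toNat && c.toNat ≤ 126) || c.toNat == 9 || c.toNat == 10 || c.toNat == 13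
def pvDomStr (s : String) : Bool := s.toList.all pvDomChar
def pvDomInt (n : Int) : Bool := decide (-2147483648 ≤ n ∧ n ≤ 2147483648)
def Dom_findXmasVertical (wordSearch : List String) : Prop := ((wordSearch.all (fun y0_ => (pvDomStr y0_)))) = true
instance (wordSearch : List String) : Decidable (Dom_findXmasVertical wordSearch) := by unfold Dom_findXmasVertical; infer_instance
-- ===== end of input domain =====

-- B replaces the two str.count scans per column string with a single structural
-- 4-character sliding window over the column list (objective: alternative).


-- ===== PORT A =====
-- tempList holds the 1-char strings line[curr]; modelled as the chars, with the
-- final ''.join ported literally as PySem.Chars.join over the singleton lists.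
def findXmasVertical (wordSearch : List String) : Int :=
  (PySem.List.pyRange 0 (PySem.Str.len (PySem.List.pyGetD wordSearch 1 "")) 1).foldl
    (fun numFound curr =>
      let tempList : List Char :=
        wordSearch.foldl (fun tl line => tl ++ [PySem.List.pyGetD line.toList curr ' ']) []
      let columnStr : List Char := PySem.Chars.join [] (tempList.map (fun ch => [ch]))
      numFound + (PySem.Chars.count columnStr "XMAS".toList : Int)
               + (PySem.Chars.count columnStr "SAMX".toList : Int)) 0

-- ===== PORT B =====
-- the inner loop of B: roll a window of the last three chars down the column.
-- Python guards with 'p1 is not None'; p1 set implies p2, p3 set in every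
-- reachable state, so the port matches on all three.
def rollStep (st : Option Char × Option Char × Option Char × Int) (ch : Char) :
    Option Char × Option Char × Option Char × Int :=
  match st with
  | (some x, some y, some z, tot) =>
      (some y, some z, some ch,
        if [x, y, z, ch] = ['X','M','A','S'] ∨ [x, y, z, ch] = ['S','A','M','X'] then tot + 1 else tot)
  | (_, p2, p3, tot) => (p2, p3, some ch, tot)

def findXmasVertical_alt (wordSearch : List String) : Int :=
  (PySem.List.pyRange 0 (PySem.Str.len (PySem.List.pyGetD wordSearch 1 "")) 1).foldl
    (fun total c =>
      ((wordSearch.map (fun row => PySem.List.pyGetD row.toList c ' ')).foldl rollStep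
        (none, none, none, total)).2.2.2) 0

-- ===== PRECONDITION & SPEC =====
-- Pre_ excludes exactly the inputs where the Python A raises IndexError:
-- fewer than 2 rows (wordSearch[1]), or a row shorter than len(wordSearch[1]) (line[curr]).
def Pre_findXmasVertical (wordSearch : List String) : Prop :=
  2 ≤ wordSearch.length ∧
  ∀ s ∈ wordSearch, PySem.Str.len (PySem.List.pyGetD wordSearch 1 "") ≤ PySem.Str.len s
instance (wordSearch : List String) : Decidable (Pre_findXmasVertical wordSearch) := by
  unfold Pre_findXmasVertical; infer_instance

def pvWitness_findXmasVertical : List String := ["XMAS", "MASX", "ASXM", "SXMA"]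

def Spec_findXmasVertical (wordSearch : List String) (out : Int) : Prop := out = findXmasVertical_alt wordSearch
instance (wordSearch : List String) (out : Int) : Decidable (Spec_findXmasVertical wordSearch out) := by unfold Spec_findXmasVertical; infer_instance

-- ===== CLAIM (what is proved, stated in full; the proofs are below) =====
def Claim_equal_findXmasVertical : Prop := ∀ (wordSearch : List String), Dom_findXmasVertical wordSearch → Pre_findXmasVertical wordSearch → Spec_findXmasVertical wordSearch (findXmasVertical wordSearch)

-- ===== LEMMAS AND PROOFS =====

-- total number of (possibly overlapping) occurrences of p in l
def occ (p : List Char) : List Char → Nat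
  | [] => 0
  | h :: t => (if p.isPrefixOf (h :: t) then 1 else 0) + occ p t

lemma occ_step_X (l : List Char) (h : (['X','M','A','S'] : List Char).isPrefixOf l) :
    occ ['X','M','A','S'] l = 1 + occ ['X','M','A','S'] (l.drop 4) := by
  rcases l with _|⟨a,_|⟨b,_|⟨c,_|⟨d,r⟩⟩⟩⟩ <;> simp [List.isPrefixOf] at h
  obtain ⟨ha,hb,hc,hd⟩ := h; subst ha hb hc hd
  simp [occ, List.isPrefixOf]

lemma occ_step_S (l : List Char) (h : (['S','A','M','X'] : List Char).isPrefixOf l) :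
    occ ['S','A','M','X'] l = 1 + occ ['S','A','M','X'] (l.drop 4) := by
  rcases l with _|⟨a,_|⟨b,_|⟨c,_|⟨d,r⟩⟩⟩⟩ <;> simp [List.isPrefixOf] at h
  obtain ⟨ha,hb,hc,hd⟩ := h; subst ha hb hc hd
  simp [occ, List.isPrefixOf]

-- Python's non-overlapping str.count agrees with occ for a pattern whose
-- occurrences cannot overlap (hstep)
lemma go_eq (p : List Char) (hp : p ≠ [])
    (hstep : ∀ l : List Char, p.isPrefixOf l → occ p l = 1 + occ p (l.drop p.length)) :
    ∀ (fuel : Nat) (l : List Char) (acc : Nat), l.length ≤ fuel →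
      PySem.Chars.count.go p fuel l acc = acc + occ p l := by
  intro fuel
  induction fuel with
  | zero => intro l acc h; have : l = [] := by cases l <;> simp_all
            subst this; simp [PySem.Chars.count.go, occ]
  | succ n ih =>
    intro l acc h
    cases l with
    | nil => simp [PySem.Chars.count.go, occ]
    | cons x t =>
      rw [PySem.Chars.count.go]
      split
      · rename_i hpre
        have hl : 1 ≤ p.length := by cases p <;> simp_all
        rw [ih _ _ (by simp only [List.length_drop, List.length_cons]; simp at h; omega)]
        rw [hstep _ hpre]; omega
      · rename_i hpre
        rw [ih _ _ (by simp at h; omega)]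
        simp [occ, hpre]

lemma count_eq_occ_X (l : List Char) :
    PySem.Chars.count l "XMAS".toList = occ ['X','M','A','S'] l := by
  rw [PySem.Chars.count]
  simp only [show ("XMAS".toList : List Char) = ['X','M','A','S'] from rfl]
  rw [if_neg (by simp), go_eq _ (by simp) occ_step_X _ _ _ le_rfl]
  simp

lemma count_eq_occ_S (l : List Char) :
    PySem.Chars.count l "SAMX".toList = occ ['S','A','M','X'] l := by
  rw [PySem.Chars.count]
  simp only [show ("SAMX".toList : List Char) = ['S','A','M','X'] from rfl]
  rw [if_neg (by simp), go_eq _ (by simp) occ_step_S _ _ _ le_rfl]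
  simp

lemma quad_prefix (p1 p2 p3 p4 a b c d : Char) (t : List Char) :
    ([p1,p2,p3,p4] : List Char).isPrefixOf (a :: b :: c :: d :: t) = true ↔
      [a, b, c, d] = [p1, p2, p3, p4] := by
  simp [List.isPrefixOf]
  constructor
  · rintro ⟨h1,h2,h3,h4⟩; simp [h1,h2,h3,h4]
  · rintro ⟨h1,h2,h3,h4⟩; simp [h1,h2,h3,h4]

lemma occ_quad_cons (p1 p2 p3 p4 a b c d : Char) (t : List Char) :
    occ [p1,p2,p3,p4] (a :: b :: c :: d :: t)
      = (if [a, b, c, d] = [p1, p2, p3, p4] then 1 else 0) + occ [p1,p2,p3,p4] (b :: c :: d :: t) := by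
  have h1 : occ [p1,p2,p3,p4] (a :: b :: c :: d :: t)
      = (if ([p1,p2,p3,p4] : List Char).isPrefixOf (a :: b :: c :: d :: t) then 1 else 0)
        + occ [p1,p2,p3,p4] (b :: c :: d :: t) := rfl
  rw [h1]
  simp only [quad_prefix]

-- B's rolling window counts exactly the occurrences of both patterns
lemma rollFold_eq (l : List Char) : ∀ (x y z : Char) (tot : Int),
    (l.foldl rollStep (some x, some y, some z, tot)).2.2.2
      = tot + occ ['X','M','A','S'] (x :: y :: z :: l) + occ ['S','A','M','X'] (x :: y :: z :: l) := by
  induction l with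
  | nil => intro x y z tot; simp [occ, List.isPrefixOf]
  | cons h t ih =>
      intro x y z tot
      rw [List.foldl_cons, show rollStep (some x, some y, some z, tot) h
            = (some y, some z, some h,
                if [x, y, z, h] = ['X','M','A','S'] ∨ [x, y, z, h] = ['S','A','M','X']
                then tot + 1 else tot) from rfl,
          ih, occ_quad_cons, occ_quad_cons]
      have hne : ¬([x,y,z,h] = (['X','M','A','S'] : List Char)
          ∧ [x,y,z,h] = (['S','A','M','X'] : List Char)) := by
        rintro ⟨h1, h2⟩; rw [h1] at h2; simp at h2
      split_ifs <;> first | tauto | (push_cast; omega)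

lemma colScan_eq (col : List Char) (total : Int) :
    (col.foldl rollStep (none, none, none, total)).2.2.2
      = total + occ ['X','M','A','S'] col + occ ['S','A','M','X'] col := by
  rcases col with _|⟨a,_|⟨b,_|⟨c,rest⟩⟩⟩
  · simp [occ]
  · simp [rollStep, occ, List.isPrefixOf]
  · simp [rollStep, occ, List.isPrefixOf]
  · rw [show ((a :: b :: c :: rest).foldl rollStep (none, none, none, total))
          = rest.foldl rollStep (some a, some b, some c, total) from rfl,
        rollFold_eq]

lemma step_eq (ws : List String) (numFound : Int) (curr : Int) :
    numFound
      + (PySem.Chars.count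
          (PySem.Chars.join []
            ((ws.foldl (fun tl line => tl ++ [PySem.List.pyGetD line.toList curr ' ']) []).map
              (fun ch => [ch]))) "XMAS".toList : Int)
      + (PySem.Chars.count
          (PySem.Chars.join []
            ((ws.foldl (fun tl line => tl ++ [PySem.List.pyGetD line.toList curr ' ']) []).map
              (fun ch => [ch]))) "SAMX".toList : Int)
    = ((ws.map (fun row => PySem.List.pyGetD row.toList curr ' ')).foldl rollStep
        (none, none, none, numFound)).2.2.2 := by
  rw [PySem.List.foldl_append_singleton_eq_map, PySem.Chars.join_nil_singletons]
  rw [count_eq_occ_X, count_eq_occ_S, colScan_eq]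
  simp only [List.nil_append]

-- ===== VERDICT (by name: the statement is the Claim_ definition above) =====
theorem findXmasVertical_spec : Claim_equal_findXmasVertical := by
  intro ws _ _
  unfold Spec_findXmasVertical findXmasVertical findXmasVertical_alt
  have hfun :
      (fun (numFound : Int) (curr : Int) =>
        let tempList : List Char :=
          ws.foldl (fun tl line => tl ++ [PySem.List.pyGetD line.toList curr ' ']) []
        let columnStr : List Char := PySem.Chars.join [] (tempList.map (fun ch => [ch]))
        numFound + (PySem.Chars.count columnStr "XMAS".toList : Int)
                 + (PySem.Chars.count columnStr "SAMX".toList : Int))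
      = (fun (total : Int) (c : Int) =>
        ((ws.map (fun row => PySem.List.pyGetD row.toList c ' ')).foldl rollStep
          (none, none, none, total)).2.2.2) := by
    funext acc c
    exact step_eq ws acc c
  rw [hfun]
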